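-- pv_equiv track=rewrite | github.com/SamEthanMathew/PokerAI-Hackathon-2026 | submission/lambdaV1.py | _bucket_flop_simple
-- ===== SOURCE A (Python) =====
-- from collections import Counter
--
-- NUM_RANKS = 9
--
-- RANK_A    = 8
--
-- def _rank(c):
--     return c % NUM_RANKS
--
-- def _suit(c):
--     return c // NUM_RANKS
--
-- def _max_connectivity(ranks):
--     unique = sorted(set(ranks))
--     if not unique:
--         return 0
--     best = cur = 1
--     for i in range(1, len(unique)):
--         if unique[i] - unique[i - 1] == 1:
--             cur += 1
--             best = max(best, cur)
--         else:
--             cur = 1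
--     if RANK_A in unique and 0 in unique:
--         best = max(best, 2)
--     return best
--
-- def _bucket_flop_simple(community):
--     if not community or len(community) < 3:
--         return "medium"
--     suits  = [_suit(c) for c in community]
--     ranks  = [_rank(c) for c in community]
--     sc     = Counter(suits)
--     rc     = Counter(ranks)
--     score  = 0
--     if sc.most_common(1)[0][1] >= 3:   score += 3
--     elif sc.most_common(1)[0][1] >= 2: score += 1
--     conn = _max_connectivity(ranks)
--     if conn >= 3:   score += 2
--     elif conn >= 2: score += 1
--     if rc.most_common(1)[0][1] >= 2: score += 1
--     if score >= 3: return "wet"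
--     if score >= 1: return "medium"
--     return "dry"
-- ===== SOURCE B (Python) =====
-- def _bucket_flop_simple(community):
--     if len(community) < 3:
--         return "medium"
--     suit_count = {}
--     rank_count = {}
--     for c in community:
--         s = c // 9
--         r = c % 9
--         suit_count[s] = suit_count.get(s, 0) + 1
--         rank_count[r] = rank_count.get(r, 0) + 1
--     flush = max(suit_count.values())
--     if any(r in rank_count and r + 1 in rank_count and r + 2 in rank_count for r in range(7)):
--         conn = 2
--     elif any(r in rank_count and r + 1 in rank_count for r in range(8)) or (8 in rank_count and 0 in rank_count):
--         conn = 1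
--     else:
--         conn = 0
--     score = (3 if flush >= 3 else 1 if flush >= 2 else 0) \
--             + conn \
--             + (1 if max(rank_count.values()) >= 2 else 0)
--     return "wet" if score >= 3 else "medium" if score >= 1 else "dry"
-- ===== Notes on version B (the rewrite author's own statement) =====
-- stated objective: simpler
-- what changed: B drops the _max_connectivity helper (sort the distinct ranks, scan for the longest consecutive run) and the Counter.most_common sort: it builds the suit/rank count dicts in one pass and scores connectivity by direct presence predicates (a rank triple r,r+1,r+2 present, an adjacent pair, or the A+deuce wheel) and flush/pair by the max of the dict values.
import Mathlib
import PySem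

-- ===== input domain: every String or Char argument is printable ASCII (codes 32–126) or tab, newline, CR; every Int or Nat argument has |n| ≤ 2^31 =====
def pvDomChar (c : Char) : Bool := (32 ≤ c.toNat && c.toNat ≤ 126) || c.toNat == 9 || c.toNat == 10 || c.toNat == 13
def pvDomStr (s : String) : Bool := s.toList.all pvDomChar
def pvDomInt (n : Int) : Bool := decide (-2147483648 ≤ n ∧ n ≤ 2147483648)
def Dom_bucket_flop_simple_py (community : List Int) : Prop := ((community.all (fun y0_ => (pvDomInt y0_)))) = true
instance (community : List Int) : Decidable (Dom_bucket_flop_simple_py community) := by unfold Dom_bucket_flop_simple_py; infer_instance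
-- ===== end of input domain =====

-- B replaces A's sort-the-distinct-ranks max-run helper by direct presence predicates over a
-- rank-count dict built in one pass; same return value everywhere (return-value equivalence, no mutation).

-- ===== PORT A =====

-- A's _max_connectivity loop: state (best, cur), prev = previous unique rank
def pvMaxConnLoop : Int → Int → Int → List Int → Int
  | best, _cur, _prev, [] => best
  | best, cur, prev, x :: rest =>
    if x - prev = 1 then pvMaxConnLoop (max best (cur + 1)) (cur + 1) x rest
    else pvMaxConnLoop best 1 x rest

-- A's _max_connectivity (sorted(set(ranks)) has no key: order-independent, exact)
def pvMaxConnectivity (ranks : List Int) : Int :=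
  match PySem.List.sorted (PySem.Set.ofList ranks) (fun x => x) false with
  | [] => 0
  | p :: t =>
      let best := pvMaxConnLoop 1 1 p t
      if 8 ∈ p :: t ∧ 0 ∈ p :: t then max best 2 else best

-- Counter.most_common(1)[0][1]: sort items by count, descending (stable);
-- the [] branch is unreachable where it is called (Python raises IndexError there; guarded by len ≥ 3)
def pvMostCommon1Count (d : PySem.Dict Int Int) : Int :=
  match PySem.List.sorted d.items (fun p => p.2) true with
  | [] => 0
  | p :: _ => p.2

def bucket_flop_simple_py (community : List Int) : String :=
  if community = [] ∨ PySem.List.len community < 3 then "medium"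
  else
    let suits := community.map (fun c => PySem.Int.floordiv c 9)
    let ranks := community.map (fun c => PySem.Int.mod c 9)
    let sc := PySem.Dict.counter suits
    let rc := PySem.Dict.counter ranks
    let score : Int := 0
    let score := if pvMostCommon1Count sc ≥ 3 then score + 3
                 else if pvMostCommon1Count sc ≥ 2 then score + 1 else score
    let conn := pvMaxConnectivity ranks
    let score := if conn ≥ 3 then score + 2 else if conn ≥ 2 then score + 1 else score
    let score := if pvMostCommon1Count rc ≥ 2 then score + 1 else score
    if score ≥ 3 then "wet" else if score ≥ 1 then "medium" else "dry"

-- ===== PORT B =====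

-- max(d.values()); the none branch is unreachable where it is called (Python raises ValueError; guarded by len ≥ 3)
def pvMaxValues (d : PySem.Dict Int Int) : Int :=
  match PySem.List.max? d.values (fun x => x) with
  | none => 0
  | some m => m

def bucket_flop_simple_py_alt (community : List Int) : String :=
  if PySem.List.len community < 3 then "medium"
  else
    let dicts := community.foldl
      (fun (d : PySem.Dict Int Int × PySem.Dict Int Int) c =>
        let s := PySem.Int.floordiv c 9
        let r := PySem.Int.mod c 9
        (d.1.insert s (d.1.getD s 0 + 1), d.2.insert r (d.2.getD r 0 + 1)))
      (PySem.Dict.empty, PySem.Dict.empty)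
    let sc := dicts.1
    let rc := dicts.2
    let flush := pvMaxValues sc
    let conn : Int :=
      if (PySem.List.pyRange 0 7).any
           (fun r => rc.contains r && rc.contains (r + 1) && rc.contains (r + 2)) then 2
      else if (PySem.List.pyRange 0 8).any (fun r => rc.contains r && rc.contains (r + 1))
              || (rc.contains 8 && rc.contains 0) then 1
      else 0
    let score := (if flush ≥ 3 then (3 : Int) else if flush ≥ 2 then 1 else 0) + conn
                 + (if pvMaxValues rc ≥ 2 then 1 else 0)
    if score ≥ 3 then "wet" else if score ≥ 1 then "medium" else "dry"

-- ===== PRECONDITION & SPEC =====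
def Spec_bucket_flop_simple_py (community : List Int) (out : String) : Prop := out = bucket_flop_simple_py_alt community
instance (community : List Int) (out : String) : Decidable (Spec_bucket_flop_simple_py community out) := by unfold Spec_bucket_flop_simple_py; infer_instance

-- ===== CLAIM (what is proved, stated in full; the proofs are below) =====
def Claim_equal_bucket_flop_simple_py : Prop := ∀ (community : List Int), Dom_bucket_flop_simple_py community → Spec_bucket_flop_simple_py community (bucket_flop_simple_py community)

-- ===== LEMMAS AND PROOFS =====

lemma final_bucket (s t : Int) (h : s = t) :
    (if s ≥ 3 then "wet" else if s ≥ 1 then "medium" else "dry")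
      = (if t ≥ 3 then "wet" else if t ≥ 1 then "medium" else "dry") := by rw [h]

-- maximal consecutive run ending at the "current" position, seeded with c; tracks A's loop
def pvBest : Int → Int → List Int → Int
  | c, _prev, [] => c
  | c, prev, x :: r => if x - prev = 1 then pvBest (c + 1) x r else max c (pvBest 1 x r)

lemma pvBest_ge : ∀ (l : List Int) (prev c : Int), c ≤ pvBest c prev l := by
  intro l
  induction l with
  | nil => intro prev c; simp [pvBest]
  | cons x r ih =>
    intro prev c
    simp only [pvBest]
    split
    · have := ih x (c + 1); omega
    · exact le_max_left _ _

lemma pvMaxConnLoop_eq_best : ∀ (l : List Int) (prev c b : Int), 1 ≤ c → c ≤ b →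
    pvMaxConnLoop b c prev l = max b (pvBest c prev l) := by
  intro l
  induction l with
  | nil => intro prev c b h1 h2; simp [pvMaxConnLoop, pvBest]; omega
  | cons x r ih =>
    intro prev c b h1 h2
    simp only [pvMaxConnLoop, pvBest]
    split
    · rw [ih x (c + 1) (max b (c + 1)) (by omega) (le_max_right _ _)]
      have := pvBest_ge r x (c + 1)
      omega
    · rw [ih x 1 b (by omega) (by omega)]
      have := pvBest_ge r x 1
      omega

-- some adjacent pair prev::l differs by 1
def pvHasPair : Int → List Int → Prop
  | _, [] => False
  | prev, x :: r => x - prev = 1 ∨ pvHasPair x r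

-- the head of l is prev + 1
def pvHeadExt : Int → List Int → Prop
  | _, [] => False
  | prev, y :: _ => y - prev = 1

-- some three consecutive positions of prev::l increase by 1 twice
def pvHasTriple : Int → List Int → Prop
  | _, [] => False
  | prev, x :: r => (x - prev = 1 ∧ pvHeadExt x r) ∨ pvHasTriple x r

lemma pvBest_ge2 : ∀ (l : List Int) (prev c : Int), 1 ≤ c →
    (2 ≤ pvBest c prev l ↔ 2 ≤ c ∨ pvHasPair prev l) := by
  intro l
  induction l with
  | nil => intro prev c h1; simp [pvBest, pvHasPair]
  | cons x r ih =>
    intro prev c h1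
    simp only [pvBest, pvHasPair]
    split
    · rename_i hx
      rw [ih x (c + 1) (by omega)]
      constructor
      · intro _; right; left; exact hx
      · intro _; left; omega
    · rename_i hne
      rw [le_max_iff, ih x 1 (by omega)]
      constructor
      · rintro (h | (h | hp))
        · left; exact h
        · omega
        · right; right; exact hp
      · rintro (h | hx | hp)
        · left; exact h
        · exact absurd hx hne
        · right; right; exact hp

lemma pvBest_ge3 : ∀ (l : List Int) (prev c : Int), 1 ≤ c →
    (3 ≤ pvBest c prev l ↔ 3 ≤ c ∨ (2 ≤ c ∧ pvHeadExt prev l) ∨ pvHasTriple prev l) := by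
  intro l
  induction l with
  | nil => intro prev c h1; simp [pvBest, pvHeadExt, pvHasTriple]
  | cons x r ih =>
    intro prev c h1
    simp only [pvBest, pvHasTriple]
    split
    · rename_i hx
      rw [ih x (c + 1) (by omega)]
      constructor
      · rintro (h | ⟨h2, he⟩ | ht)
        · right; left; exact ⟨by omega, hx⟩
        · right; right; left; exact ⟨hx, he⟩
        · right; right; right; exact ht
      · rintro (h | ⟨h2c, _⟩ | ⟨_, he⟩ | ht)
        · left; omega
        · left; omega
        · right; left; exact ⟨by omega, he⟩
        · right; right; exact ht
    · rename_i hne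
      rw [le_max_iff, ih x 1 (by omega)]
      constructor
      · rintro (h | (h | ⟨h2, _⟩ | ht))
        · left; exact h
        · omega
        · omega
        · right; right; right; exact ht
      · rintro (h | ⟨_, hx⟩ | ⟨hx, _⟩ | ht)
        · left; exact h
        · exact absurd hx hne
        · exact absurd hx hne
        · right; right; right; exact ht

lemma pvHasPair_mem : ∀ (t : List Int) (p : Int), pvHasPair p t →
    ∃ r, r ∈ p :: t ∧ r + 1 ∈ p :: t := by
  intro t
  induction t with
  | nil => intro p h; exact absurd h (by simp [pvHasPair])
  | cons x r ih =>
    intro p h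
    simp only [pvHasPair] at h
    rcases h with h | h
    · refine ⟨p, List.mem_cons_self .., ?_⟩
      have hx : p + 1 = x := by omega
      rw [hx]; exact List.mem_cons_of_mem _ (List.mem_cons_self ..)
    · obtain ⟨v, hv1, hv2⟩ := ih x h
      exact ⟨v, List.mem_cons_of_mem _ hv1, List.mem_cons_of_mem _ hv2⟩

lemma pvHasTriple_mem : ∀ (t : List Int) (p : Int), pvHasTriple p t →
    ∃ r, r ∈ p :: t ∧ r + 1 ∈ p :: t ∧ r + 2 ∈ p :: t := by
  intro t
  induction t with
  | nil => intro p h; exact absurd h (by simp [pvHasTriple])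
  | cons x r ih =>
    intro p h
    simp only [pvHasTriple] at h
    rcases h with ⟨h1, h2⟩ | h
    · cases r with
      | nil => simp [pvHeadExt] at h2
      | cons y r2 =>
        simp only [pvHeadExt] at h2
        refine ⟨p, List.mem_cons_self .., ?_, ?_⟩
        · have hx : p + 1 = x := by omega
          rw [hx]; exact List.mem_cons_of_mem _ (List.mem_cons_self ..)
        · have hy : p + 2 = y := by omega
          rw [hy]
          exact List.mem_cons_of_mem _ (List.mem_cons_of_mem _ (List.mem_cons_self ..))
    · obtain ⟨v, hv1, hv2, hv3⟩ := ih x h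
      exact ⟨v, List.mem_cons_of_mem _ hv1, List.mem_cons_of_mem _ hv2, List.mem_cons_of_mem _ hv3⟩

lemma mem_pvHasPair : ∀ (t : List Int) (p r : Int), (p :: t).Pairwise (· < ·) →
    r ∈ p :: t → r + 1 ∈ p :: t → pvHasPair p t := by
  intro t
  induction t with
  | nil => intro p r _ h1 h2; simp at h1 h2; omega
  | cons x t2 ih =>
    intro p r hpw h1 h2
    have hpx : p < x := (List.pairwise_cons.mp hpw).1 x (by simp)
    have hall : ∀ y ∈ x :: t2, p < y := (List.pairwise_cons.mp hpw).1
    have htl : (x :: t2).Pairwise (· < ·) := (List.pairwise_cons.mp hpw).2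
    have hmin : ∀ y ∈ t2, x < y := (List.pairwise_cons.mp htl).1
    simp only [pvHasPair]
    rcases List.mem_cons.mp h1 with rfl | h1'
    · rcases List.mem_cons.mp h2 with h2' | h2''
      · omega
      · rcases List.mem_cons.mp h2'' with rfl | h2t
        · exact Or.inl (by omega)
        · have := hmin _ h2t; omega
    · have hpr : p < r := hall _ h1'
      have h2' : r + 1 ∈ x :: t2 := by
        rcases List.mem_cons.mp h2 with h | h
        · omega
        · exact h
      exact Or.inr (ih x r htl h1' h2')

lemma mem_pvHasTriple : ∀ (t : List Int) (p r : Int), (p :: t).Pairwise (· < ·) →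
    r ∈ p :: t → r + 1 ∈ p :: t → r + 2 ∈ p :: t → pvHasTriple p t := by
  intro t
  induction t with
  | nil => intro p r _ h1 h2 _; simp at h1 h2; omega
  | cons x t2 ih =>
    intro p r hpw h1 h2 h3
    simp only [pvHasTriple]
    have hall : ∀ y ∈ x :: t2, p < y := (List.pairwise_cons.mp hpw).1
    have hpx : p < x := hall x (by simp)
    have htl : (x :: t2).Pairwise (· < ·) := (List.pairwise_cons.mp hpw).2
    have hmin : ∀ y ∈ t2, x < y := (List.pairwise_cons.mp htl).1
    rcases List.mem_cons.mp h1 with rfl | h1'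
    · -- r = p
      have h2' : r + 1 ∈ x :: t2 := by
        rcases List.mem_cons.mp h2 with h | h; · omega
        · exact h
      have h3' : r + 2 ∈ x :: t2 := by
        rcases List.mem_cons.mp h3 with h | h; · omega
        · exact h
      rcases List.mem_cons.mp h2' with hx1 | h2t
      · -- x = r + 1 : need head of t2 = r + 2
        have h3t : r + 2 ∈ t2 := by
          rcases List.mem_cons.mp h3' with h | h; · omega
          · exact h
        cases t2 with
        | nil => simp at h3t
        | cons z t3 =>
          have hz : x < z := hmin z (by simp)
          have hzmin : ∀ y ∈ t3, z < y := (List.pairwise_cons.mp (List.pairwise_cons.mp htl).2).1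
          have hz2 : z = r + 2 := by
            rcases List.mem_cons.mp h3t with h | h; · omega
            · have := hzmin _ h; omega
          exact Or.inl ⟨by omega, by simp [pvHeadExt]; omega⟩
      · have := hmin _ h2t; omega
    · have hpr : p < r := hall _ h1'
      have h2' : r + 1 ∈ x :: t2 := by
        rcases List.mem_cons.mp h2 with h | h; · omega
        · exact h
      have h3' : r + 2 ∈ x :: t2 := by
        rcases List.mem_cons.mp h3 with h | h; · omega
        · exact h
      exact Or.inr (ih x r htl h1' h2' h3')

lemma mem_sortedSet_iff (ranks : List Int) (r : Int) :
    r ∈ PySem.List.sorted (PySem.Set.ofList ranks) (fun x => x) false ↔ r ∈ ranks := by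
  rw [PySem.List.mem_sorted, PySem.Set.mem_ofList]

lemma sortedSet_ne_nil {ranks : List Int} (h : ranks ≠ []) :
    PySem.List.sorted (PySem.Set.ofList ranks) (fun x => x) false ≠ [] := by
  intro hnil
  cases ranks with
  | nil => exact h rfl
  | cons a t =>
    have : a ∈ PySem.List.sorted (PySem.Set.ofList (a :: t)) (fun x => x) false :=
      (mem_sortedSet_iff _ _).mpr (by simp)
    rw [hnil] at this; simp at this

lemma conn3_iff {ranks : List Int} (h : ranks ≠ []) :
    3 ≤ pvMaxConnectivity ranks ↔ ∃ r, r ∈ ranks ∧ r + 1 ∈ ranks ∧ r + 2 ∈ ranks := by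
  unfold pvMaxConnectivity
  have hsort := PySem.List.sorted_ofList_pairwise_lt (κ := Int) ranks
  rcases hu : PySem.List.sorted (PySem.Set.ofList ranks) (fun x => x) false with _ | ⟨p, t⟩
  · exact absurd hu (sortedSet_ne_nil h)
  · rw [hu] at hsort
    have hmem : ∀ r, r ∈ p :: t ↔ r ∈ ranks := by
      intro r; rw [← hu, mem_sortedSet_iff]
    have hcore : pvMaxConnLoop 1 1 p t = pvBest 1 p t := by
      rw [pvMaxConnLoop_eq_best t p 1 1 (le_refl 1) (le_refl 1)]
      have := pvBest_ge t p 1; omega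
    have h3 : 3 ≤ pvBest 1 p t ↔ pvHasTriple p t := by
      rw [pvBest_ge3 t p 1 (by omega)]
      constructor
      · rintro (h | h | h)
        · omega
        · omega
        · exact h
      · intro h; right; right; exact h
    have key : 3 ≤ pvBest 1 p t ↔ ∃ r, r ∈ ranks ∧ r + 1 ∈ ranks ∧ r + 2 ∈ ranks := by
      rw [h3]
      constructor
      · intro ht
        obtain ⟨r, h1, h2, h4⟩ := pvHasTriple_mem t p ht
        exact ⟨r, (hmem r).mp h1, (hmem (r+1)).mp h2, (hmem (r+2)).mp h4⟩
      · rintro ⟨r, h1, h2, h4⟩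
        exact mem_pvHasTriple t p r hsort ((hmem r).mpr h1) ((hmem (r+1)).mpr h2) ((hmem (r+2)).mpr h4)
    simp only [hcore]
    split
    · rw [← key]; omega
    · exact key

lemma conn2_iff {ranks : List Int} (h : ranks ≠ []) :
    2 ≤ pvMaxConnectivity ranks ↔ (∃ r, r ∈ ranks ∧ r + 1 ∈ ranks) ∨ (8 ∈ ranks ∧ 0 ∈ ranks) := by
  unfold pvMaxConnectivity
  have hsort := PySem.List.sorted_ofList_pairwise_lt (κ := Int) ranks
  rcases hu : PySem.List.sorted (PySem.Set.ofList ranks) (fun x => x) false with _ | ⟨p, t⟩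
  · exact absurd hu (sortedSet_ne_nil h)
  · rw [hu] at hsort
    have hmem : ∀ r, r ∈ p :: t ↔ r ∈ ranks := by
      intro r; rw [← hu, mem_sortedSet_iff]
    have hcore : pvMaxConnLoop 1 1 p t = pvBest 1 p t := by
      rw [pvMaxConnLoop_eq_best t p 1 1 (le_refl 1) (le_refl 1)]
      have := pvBest_ge t p 1; omega
    have h2 : 2 ≤ pvBest 1 p t ↔ pvHasPair p t := by
      rw [pvBest_ge2 t p 1 (by omega)]
      constructor
      · rintro (h' | h')
        · omega
        · exact h'
      · exact Or.inr
    have key : 2 ≤ pvBest 1 p t ↔ ∃ r, r ∈ ranks ∧ r + 1 ∈ ranks := by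
      rw [h2]
      constructor
      · intro ht
        obtain ⟨r, h1, hr2⟩ := pvHasPair_mem t p ht
        exact ⟨r, (hmem r).mp h1, (hmem (r+1)).mp hr2⟩
      · rintro ⟨r, h1, hr2⟩
        exact mem_pvHasPair t p r hsort ((hmem r).mpr h1) ((hmem (r+1)).mpr hr2)
    simp only [hcore]
    split
    · rename_i hw
      rw [hmem 8, hmem 0] at hw
      constructor
      · intro _; right; exact hw
      · intro _; omega
    · rename_i hw
      rw [hmem 8, hmem 0] at hw
      rw [key]
      exact ⟨fun h' => Or.inl h', fun h' => h'.resolve_right hw⟩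

lemma pvMax?_cons_some : ∀ (t : List Int) (a : Int),
    ∃ m, PySem.List.max? (a :: t) (fun x : Int => x) = some m := by
  intro t
  induction t with
  | nil => intro a; exact ⟨a, rfl⟩
  | cons y t2 ih =>
    intro a
    by_cases h : a < y
    · obtain ⟨m, hm⟩ := ih y
      refine ⟨m, ?_⟩
      simp only [PySem.List.max?, List.foldl] at hm ⊢
      simpa [h] using hm
    · obtain ⟨m, hm⟩ := ih a
      refine ⟨m, ?_⟩
      simp only [PySem.List.max?, List.foldl] at hm ⊢
      simpa [h] using hm

-- both "biggest count" readings agree on a nonempty Counter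
lemma mostCommon_eq_maxValues {xs : List Int} (h : xs ≠ []) :
    pvMostCommon1Count (PySem.Dict.counter xs) = pvMaxValues (PySem.Dict.counter xs) := by
  unfold pvMostCommon1Count pvMaxValues
  have hitems := PySem.Dict.items_counter xs
  have hne : (PySem.Dict.counter xs).items ≠ [] := by
    rw [hitems]
    cases xs with
    | nil => exact absurd rfl h
    | cons a t =>
      have : a ∈ PySem.Set.ofList (a :: t) := (PySem.Set.mem_ofList _ _).mpr (by simp)
      intro hc
      simp only [List.map_eq_nil_iff] at hc
      rw [hc] at this; simp at this
  rcases hs : PySem.List.sorted (PySem.Dict.counter xs).items (fun p => p.2) true with _ | ⟨q, ts⟩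
  · have := PySem.List.sorted_perm (PySem.Dict.counter xs).items (fun p : Int × Int => p.2) true
    rw [hs] at this
    exact absurd this.symm.eq_nil hne
  · have hq : q ∈ (PySem.Dict.counter xs).items :=
      (PySem.List.sorted_perm _ _ _).mem_iff.mp (by rw [hs]; simp)
    have hqmax := PySem.List.key_head_sorted_rev_ge (PySem.Dict.counter xs).items (fun p => p.2) hs
    have hvals : (PySem.Dict.counter xs).values = (PySem.Dict.counter xs).items.map (·.2) := rfl
    rcases hm : PySem.List.max? (PySem.Dict.counter xs).values (fun x => x) with _ | m
    · exfalso
      have : (PySem.Dict.counter xs).values ≠ [] := by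
        rw [hvals]; simpa using hne
      cases hv : (PySem.Dict.counter xs).values with
      | nil => exact this hv
      | cons a t =>
        obtain ⟨m, hmm⟩ := pvMax?_cons_some t a
        rw [hv, hmm] at hm
        simp at hm
    · have hmm : m ∈ (PySem.Dict.counter xs).values := PySem.List.max?_mem hm
      have hmax := PySem.List.max?_isMax hm
      have h1 : q.2 ≤ m := by
        apply hmax
        rw [hvals]
        exact List.mem_map.mpr ⟨q, hq, rfl⟩
      have h2 : m ≤ q.2 := by
        rw [hvals] at hmm
        obtain ⟨y, hy, rfl⟩ := List.mem_map.mp hmm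
        exact hqmax y hy
      exact le_antisymm h1 h2

-- ranks are in [0, 9)
lemma ranks_bounds (community : List Int) :
    ∀ x ∈ community.map (fun c => PySem.Int.mod c 9), 0 ≤ x ∧ x < 9 := by
  intro x hx
  obtain ⟨c, _, rfl⟩ := List.mem_map.mp hx
  exact ⟨PySem.Int.mod_nonneg c (by omega), PySem.Int.mod_lt c (by omega)⟩

-- ===== VERDICT (by name: the statement is the Claim_ definition above) =====
theorem bucket_flop_simple_py_spec : Claim_equal_bucket_flop_simple_py := by
  intro community _
  unfold Spec_bucket_flop_simple_py bucket_flop_simple_py bucket_flop_simple_py_alt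
  by_cases hlen : PySem.List.len community < 3
  · rw [if_pos (Or.inr hlen), if_pos hlen]
  · have hguard : ¬ (community = [] ∨ PySem.List.len community < 3) := by
      rintro (rfl | h)
      · simp [PySem.List.len] at hlen
      · exact hlen h
    rw [if_neg hguard, if_neg hlen]
    have hne : community ≠ [] := by
      rintro rfl; simp [PySem.List.len] at hlen
    set suits := community.map (fun c => PySem.Int.floordiv c 9) with hsdef
    set ranks := community.map (fun c => PySem.Int.mod c 9) with hrdef
    have hsne : suits ≠ [] := by simpa [hsdef] using hne
    have hrne : ranks ≠ [] := by simpa [hrdef] using hne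
    -- B's fold builds the two Counters
    have hfold : community.foldl
        (fun (d : PySem.Dict Int Int × PySem.Dict Int Int) c =>
          let s := PySem.Int.floordiv c 9
          let r := PySem.Int.mod c 9
          (d.1.insert s (d.1.getD s 0 + 1), d.2.insert r (d.2.getD r 0 + 1)))
        (PySem.Dict.empty, PySem.Dict.empty)
        = (PySem.Dict.counter suits, PySem.Dict.counter ranks) := by
      rw [PySem.List.foldl_prod_mk
        (f := fun (d : PySem.Dict Int Int) c => d.insert (PySem.Int.floordiv c 9) (d.getD (PySem.Int.floordiv c 9) 0 + 1))
        (g := fun (d : PySem.Dict Int Int) c => d.insert (PySem.Int.mod c 9) (d.getD (PySem.Int.mod c 9) 0 + 1))]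
      rw [← PySem.Dict.foldl_insert_getD_add_one_eq_counter suits,
          ← PySem.Dict.foldl_insert_getD_add_one_eq_counter ranks]
      rw [hsdef, hrdef, List.foldl_map, List.foldl_map]
    simp only [hfold]
    -- flush and pair features agree
    rw [← mostCommon_eq_maxValues hsne, ← mostCommon_eq_maxValues hrne]
    -- connectivity feature agrees
    have hb := ranks_bounds community
    rw [← hrdef] at hb
    have hcontains : ∀ v : Int, (PySem.Dict.counter ranks).contains v = (v ∈ ranks) := by
      intro v
      rw [PySem.Dict.contains_counter]
      simp
    have htrip : ((PySem.List.pyRange 0 7).any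
        (fun r => (PySem.Dict.counter ranks).contains r && (PySem.Dict.counter ranks).contains (r + 1)
          && (PySem.Dict.counter ranks).contains (r + 2)) = true)
        ↔ ∃ r, r ∈ ranks ∧ r + 1 ∈ ranks ∧ r + 2 ∈ ranks := by
      simp only [List.any_eq_true, hcontains, Bool.and_eq_true]
      constructor
      · rintro ⟨r, _, ⟨h1, h2⟩, h3⟩; exact ⟨r, h1, h2, h3⟩
      · rintro ⟨r, h1, h2, h3⟩
        refine ⟨r, ?_, ⟨h1, h2⟩, h3⟩
        rw [PySem.List.mem_pyRange_one]
        have := hb r h1; have := hb (r + 2) h3; omega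
    have hpair : ((PySem.List.pyRange 0 8).any
        (fun r => (PySem.Dict.counter ranks).contains r && (PySem.Dict.counter ranks).contains (r + 1)) = true)
        ↔ ∃ r, r ∈ ranks ∧ r + 1 ∈ ranks := by
      simp only [List.any_eq_true, hcontains, Bool.and_eq_true]
      constructor
      · rintro ⟨r, _, h1, h2⟩; exact ⟨r, h1, h2⟩
      · rintro ⟨r, h1, h2⟩
        refine ⟨r, ?_, h1, h2⟩
        rw [PySem.List.mem_pyRange_one]
        have := hb r h1; have := hb (r + 1) h2; omega
    have hc3 := conn3_iff hrne
    have hc2 := conn2_iff hrne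
    -- case on the three connectivity levels
    by_cases h3 : 3 ≤ pvMaxConnectivity ranks
    · have hB3 : (PySem.List.pyRange 0 7).any
          (fun r => (PySem.Dict.counter ranks).contains r && (PySem.Dict.counter ranks).contains (r + 1)
            && (PySem.Dict.counter ranks).contains (r + 2)) = true := htrip.mpr (hc3.mp h3)
      simp only [hB3, if_true]
      apply final_bucket
      split_ifs <;> omega
    · have hB3 : ¬ ((PySem.List.pyRange 0 7).any
          (fun r => (PySem.Dict.counter ranks).contains r && (PySem.Dict.counter ranks).contains (r + 1)
            && (PySem.Dict.counter ranks).contains (r + 2)) = true) := fun h => h3 (hc3.mpr (htrip.mp h))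
      by_cases h2 : 2 ≤ pvMaxConnectivity ranks
      · have hB2 : ((PySem.List.pyRange 0 8).any
            (fun r => (PySem.Dict.counter ranks).contains r && (PySem.Dict.counter ranks).contains (r + 1))
            || ((PySem.Dict.counter ranks).contains 8 && (PySem.Dict.counter ranks).contains 0)) = true := by
          rcases hc2.mp h2 with h | h
          · rw [Bool.or_eq_true]; left; exact hpair.mpr h
          · rw [Bool.or_eq_true]; right
            simp only [Bool.and_eq_true, hcontains]
            exact ⟨by simp [h.1], by simp [h.2]⟩
        simp only [Bool.not_eq_true] at hB3
        simp only [hB3, Bool.false_eq_true, if_false, hB2, if_true]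
        apply final_bucket
        split_ifs <;> omega
      · have hB2 : ¬ (((PySem.List.pyRange 0 8).any
            (fun r => (PySem.Dict.counter ranks).contains r && (PySem.Dict.counter ranks).contains (r + 1))
            || ((PySem.Dict.counter ranks).contains 8 && (PySem.Dict.counter ranks).contains 0)) = true) := by
          intro h
          apply h2; apply hc2.mpr
          rcases Bool.or_eq_true _ _ |>.mp h with h | h
          · left; exact hpair.mp h
          · right
            simp only [Bool.and_eq_true, hcontains] at h
            constructor <;> simp_all
        simp only [Bool.not_eq_true] at hB3 hB2
        simp only [hB3, hB2, Bool.false_eq_true, if_false]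
        apply final_bucket
        split_ifs <;> omega
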